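-- pv_equiv track=rewrite | github.com/aniketmondal1210/GFG-Chronicles | Difficulty: Easy/The Inverting Factor/the_inverting_factor.py | findMinimumIF
-- ===== SOURCE A (Python) =====
-- def findMinimumIF(arr):
--     # Your code goes here
--     reversed_arr = []
--     for i in arr:
--         reversed_num = int(str(i)[::-1])
--         reversed_arr.append(reversed_num)
--
--     reversed_arr.sort()
--
--     mini = float('inf')
--     for i in range(len(reversed_arr) - 1):
--         diff = abs(reversed_arr[i+1] - reversed_arr[i])
--         mini = min(mini, diff)
--
--     return mini
-- ===== SOURCE B (Python) =====
-- def findMinimumIF(arr):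
--     # Same digit-reversal step, but no sort: take the minimum absolute
--     # difference directly over all unordered pairs (quadratic, sort-free).
--     rev = [int(str(x)[::-1]) for x in arr]
--     best = float('inf')
--     tail = rev
--     while tail:
--         x, tail = tail[0], tail[1:]
--         for y in tail:
--             best = min(best, abs(x - y))
--     return best
-- ===== Notes on version B (the rewrite author's own statement) =====
-- stated objective: alternative
-- what changed: B keeps the digit-reversal step but drops the sort entirely: it computes the minimum absolute difference directly over all unordered pairs with a suffix-scanning double loop instead of sorting and scanning adjacent elements.
-- outside the precondition, e.g. on findMinimumIF([5]): A returns inf, B returns inf; on findMinimumIF([-12, 3]): A raises ValueError, B raises ValueError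
import Mathlib
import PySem

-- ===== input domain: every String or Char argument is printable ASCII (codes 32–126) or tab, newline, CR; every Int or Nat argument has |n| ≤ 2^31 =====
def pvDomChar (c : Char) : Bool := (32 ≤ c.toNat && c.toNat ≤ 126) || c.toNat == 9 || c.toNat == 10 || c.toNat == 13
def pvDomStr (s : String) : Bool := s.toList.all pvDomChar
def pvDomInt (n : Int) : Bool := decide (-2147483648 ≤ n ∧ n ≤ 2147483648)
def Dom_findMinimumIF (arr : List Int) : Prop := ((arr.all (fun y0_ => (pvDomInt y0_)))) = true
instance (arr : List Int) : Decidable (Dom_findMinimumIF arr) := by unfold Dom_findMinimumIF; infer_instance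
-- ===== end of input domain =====

-- Port A sorts the reversed values and scans adjacent gaps; port B instead takes the minimum
-- absolute difference over all unordered pairs without sorting (alternative decomposition, not faster).


-- ===== PORT A =====
-- int(str(i)[::-1]); for i < 0 Python raises ValueError (PySem.Int.ofStr? = none) — such
-- inputs are outside Pre_, the .getD 0 there is never reached under Pre_.
def pvRev (i : Int) : Int :=
  ((PySem.Str.slice? (PySem.Int.toStr i) none none (-1)).bind PySem.Int.ofStr?).getD 0

-- min(mini, d) with mini starting at float('inf'): none models inf
def pvOmin (m : Option Int) (d : Int) : Int :=
  match m with
  | none => d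
  | some v => min v d

def findMinimumIF (arr : List Int) : Int :=
  let reversedArr := arr.foldl (fun acc i => acc ++ [pvRev i]) []
  let rs := PySem.List.sorted reversedArr (fun x => x) false
  let mini := (PySem.List.pyRange 0 ((rs.length : Int) - 1) 1).foldl
    (fun (m : Option Int) i =>
      some (pvOmin m |PySem.List.pyGetD rs (i + 1) 0 - PySem.List.pyGetD rs i 0|)) none
  -- Python returns float('inf') (not an int) when arr has fewer than two elements: excluded by Pre_
  mini.getD 0

-- ===== PORT B =====
-- the 'while tail: x, tail = tail[0], tail[1:]; for y in tail: …' suffix loop of Source B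
def pvPairLoop : List Int → Option Int → Option Int
  | [], best => best
  | x :: tail, best =>
      pvPairLoop tail (tail.foldl (fun b y => some (pvOmin b |x - y|)) best)

def findMinimumIF_alt (arr : List Int) : Int :=
  let rev := arr.map pvRev
  -- float('inf') (best never updated, fewer than two elements): excluded by Pre_
  (pvPairLoop rev none).getD 0

-- ===== PRECONDITION & SPEC =====
-- Pre_ excludes lists with a negative element (int(str(i)[::-1]) raises ValueError in both
-- programs) and lists of fewer than two elements (both programs return float('inf'), not an int).
def Pre_findMinimumIF (arr : List Int) : Prop :=
  2 ≤ arr.length ∧ ∀ x ∈ arr, 0 ≤ x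
instance (arr : List Int) : Decidable (Pre_findMinimumIF arr) := by
  unfold Pre_findMinimumIF; infer_instance

def pvWitness_findMinimumIF : List Int := [12, 21]

def Spec_findMinimumIF (arr : List Int) (out : Int) : Prop := out = findMinimumIF_alt arr
instance (arr : List Int) (out : Int) : Decidable (Spec_findMinimumIF arr out) := by
  unfold Spec_findMinimumIF; infer_instance

-- ===== CLAIM (what is proved, stated in full; the proofs are below) =====
def Claim_equal_findMinimumIF : Prop :=
  ∀ (arr : List Int), Dom_findMinimumIF arr → Pre_findMinimumIF arr →
    Spec_findMinimumIF arr (findMinimumIF arr)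

-- ===== LEMMAS AND PROOFS =====

-- the list of adjacent absolute gaps
def pvAdjD : List Int → List Int
  | a :: b :: t => |b - a| :: pvAdjD (b :: t)
  | _ => []

-- the list of all pairwise absolute gaps
def pvPairD : List Int → List Int
  | [] => []
  | x :: t => t.map (fun y => |x - y|) ++ pvPairD t

-- running minimum, none = float('inf')
def pvOminA (l : List Int) (m : Option Int) : Option Int :=
  l.foldl (fun b d => some (pvOmin b d)) m

-- running minimum over l starting from accumulator m
-- (pvOminA is the common shape of both ports' loops)
lemma pvOminA_some (t : List Int) (a : Int) :
    pvOminA t (some a) = some (t.foldl min a) := by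
  induction t generalizing a with
  | nil => rfl
  | cons d t ih => simp [pvOminA, pvOmin, List.foldl_cons] at ih ⊢; exact ih (min a d)

lemma pvOminA_eq_min? (l : List Int) :
    pvOminA l none = PySem.List.min? l (fun x => x) := by
  cases l with
  | nil => rfl
  | cons x t =>
      rw [PySem.List.min?_id_cons]
      show pvOminA t (some (pvOmin none x)) = some (t.foldl min x)
      exact pvOminA_some t x

lemma pvOminA_append (l₁ l₂ : List Int) (m : Option Int) :
    pvOminA (l₁ ++ l₂) m = pvOminA l₂ (pvOminA l₁ m) :=
  List.foldl_append ..

lemma pvPairLoop_eq (l : List Int) (m : Option Int) :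
    pvPairLoop l m = pvOminA (pvPairD l) m := by
  induction l generalizing m with
  | nil => rfl
  | cons x t ih =>
      show pvPairLoop t (t.foldl (fun b y => some (pvOmin b |x - y|)) m) = _
      rw [ih, pvPairD, pvOminA_append]
      congr 1
      rw [pvOminA, List.foldl_map]

lemma mapAdj (rs : List Int) :
    (List.range (rs.length - 1)).map (fun k => |rs.getD (k+1) 0 - rs.getD k 0|) = pvAdjD rs := by
  induction rs with
  | nil => rfl
  | cons a t ih =>
      cases t with
      | nil => rfl
      | cons b t' =>
          have h : (a :: b :: t').length - 1 = (b :: t').length - 1 + 1 := by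
            simp [List.length_cons]
          rw [h, List.range_succ_eq_map, List.map_cons, List.map_map, pvAdjD]
          refine congrArg₂ _ (by simp) ?_
          rw [← ih]
          exact List.map_congr_left (fun k _ => by
            simp [Function.comp, Nat.succ_eq_add_one])

-- A's index loop is the running minimum of the adjacent gaps
lemma loopA_eq (rs : List Int) :
    (PySem.List.pyRange 0 ((rs.length : Int) - 1)).foldl
      (fun (m : Option Int) i =>
        some (pvOmin m |PySem.List.pyGetD rs (i + 1) 0 - PySem.List.pyGetD rs i 0|)) none
    = pvOminA (pvAdjD rs) none := by
  cases hn : rs.length with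
  | zero =>
      have : rs = [] := List.length_eq_zero_iff.mp hn
      subst this; rfl
  | succ m =>
      have h1 : (((m+1 : Nat)) : Int) - 1 = (m : Int) := by push_cast; ring
      rw [h1, PySem.List.pyRange_zero_natCast, List.foldl_map]
      have h2 : ∀ (k : Nat),
          |PySem.List.pyGetD rs ((k : Int) + 1) 0 - PySem.List.pyGetD rs (k : Int) 0|
          = |rs.getD (k+1) 0 - rs.getD k 0| := by
        intro k
        have : ((k : Int) + 1) = ((k + 1 : Nat) : Int) := by push_cast; ring
        rw [this, PySem.List.pyGetD_natCast, PySem.List.pyGetD_natCast]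
      have h3 : m = rs.length - 1 := by omega
      rw [← mapAdj rs, pvOminA, List.foldl_map, ← h3]
      exact PySem.List.foldl_congr_mem _ _ _ _ (fun acc k _ => by rw [h2])

-- the multiset of pairwise gaps is invariant under permutation
lemma pvPairD_perm {l l' : List Int} (h : l.Perm l') : (pvPairD l).Perm (pvPairD l') := by
  induction h with
  | nil => exact List.Perm.refl _
  | cons x h ih =>
      exact List.Perm.append (List.Perm.map _ h) ih
  | swap x y t =>
      show (pvPairD (y :: x :: t)).Perm (pvPairD (x :: y :: t))
      simp only [pvPairD, List.map_cons, List.cons_append]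
      rw [abs_sub_comm y x]
      exact List.Perm.cons _ (List.perm_append_comm_assoc _ _ _)
  | trans _ _ ih1 ih2 => exact ih1.trans ih2

-- the minimum VALUE of a list is permutation-invariant
lemma min?_perm_int {l l' : List Int} (h : l.Perm l') :
    PySem.List.min? l (fun x => x) = PySem.List.min? l' (fun x => x) := by
  cases hl : PySem.List.min? l (fun x => x) with
  | none =>
      have : l = [] := (PySem.List.min?_eq_none_iff _ _).mp hl
      subst this
      rw [List.perm_nil.mp h.symm] at *
      exact hl.symm ▸ rfl
  | some v =>
      cases hl' : PySem.List.min? l' (fun x => x) with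
      | none =>
          have : l' = [] := (PySem.List.min?_eq_none_iff _ _).mp hl'
          subst this
          simp [List.perm_nil.mp h, PySem.List.min?] at hl
      | some w =>
          have hv := PySem.List.min?_mem hl
          have hw := PySem.List.min?_mem hl'
          have h1 : v ≤ w := PySem.List.min?_isMin hl w (h.symm.subset hw)
          have h2 : w ≤ v := PySem.List.min?_isMin hl' v (h.subset hv)
          rw [le_antisymm h1 h2]

-- every adjacent gap is a pairwise gap
lemma adj_mem_pair {rs : List Int} : ∀ a ∈ pvAdjD rs, a ∈ pvPairD rs := by
  induction rs with
  | nil => simp [pvAdjD]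
  | cons x t ih =>
      cases t with
      | nil => simp [pvAdjD]
      | cons b t' =>
          intro a ha
          rw [pvAdjD] at ha
          rw [pvPairD]
          rcases List.mem_cons.mp ha with h | h
          · subst h
            refine List.mem_append_left _ ?_
            rw [abs_sub_comm]
            exact List.mem_map_of_mem List.mem_cons_self
          · exact List.mem_append_right _ (ih a h)

-- on a sorted list, every pairwise gap dominates some adjacent gap
lemma pair_ge_adj {rs : List Int} (hs : rs.Pairwise (· ≤ ·)) :
    ∀ d ∈ pvPairD rs, ∃ a ∈ pvAdjD rs, a ≤ d := by
  induction rs with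
  | nil => simp [pvPairD]
  | cons x t ih =>
      cases t with
      | nil => simp [pvPairD]
      | cons b t' =>
          intro d hd
          rw [pvPairD] at hd
          have hxb : x ≤ b := (List.pairwise_cons.mp hs).1 b List.mem_cons_self
          have hst : (b :: t').Pairwise (· ≤ ·) := (List.pairwise_cons.mp hs).2
          rcases List.mem_append.mp hd with h | h
          · -- d = |x - y| for some y in b :: t'
            rcases List.mem_map.mp h with ⟨y, hy, rfl⟩
            refine ⟨|b - x|, List.mem_cons_self, ?_⟩
            have hby : b ≤ y := by
              rcases List.mem_cons.mp hy with rfl | hy'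
              · exact le_refl _
              · exact (List.pairwise_cons.mp hst).1 y hy'
            have hxy : x ≤ y := le_trans hxb hby
            rw [abs_sub_comm x y, abs_of_nonneg (by omega), abs_of_nonneg (by omega)]
            omega
          · rcases ih hst d h with ⟨a, ha, hle⟩
            exact ⟨a, List.mem_cons_of_mem _ ha, hle⟩

-- on a sorted list of length ≥ 2 the two minima coincide
lemma min_adj_eq_min_pair {rs : List Int} (hs : rs.Pairwise (· ≤ ·)) (hlen : 2 ≤ rs.length) :
    PySem.List.min? (pvAdjD rs) (fun x => x) = PySem.List.min? (pvPairD rs) (fun x => x) := by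
  obtain ⟨x, b, t', rfl⟩ : ∃ x b t', rs = x :: b :: t' := by
    cases rs with
    | nil => simp at hlen
    | cons x t =>
        cases t with
        | nil => simp at hlen
        | cons b t' => exact ⟨x, b, t', rfl⟩
  cases ha : PySem.List.min? (pvAdjD (x :: b :: t')) (fun x => x) with
  | none =>
      have : pvAdjD (x :: b :: t') = [] := (PySem.List.min?_eq_none_iff _ _).mp ha
      simp [pvAdjD] at this
  | some v =>
      cases hp : PySem.List.min? (pvPairD (x :: b :: t')) (fun x => x) with
      | none =>
          have h0 : pvPairD (x :: b :: t') = [] := (PySem.List.min?_eq_none_iff _ _).mp hp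
          have := adj_mem_pair _ (PySem.List.min?_mem ha)
          rw [h0] at this
          simp at this
      | some w =>
          have hv := PySem.List.min?_mem ha
          have hw := PySem.List.min?_mem hp
          have h1 : w ≤ v := PySem.List.min?_isMin hp v (adj_mem_pair _ hv)
          rcases pair_ge_adj hs w hw with ⟨a, haa, hle⟩
          have h2 : v ≤ a := PySem.List.min?_isMin ha a haa
          rw [le_antisymm (le_trans h2 hle) h1]

theorem findMinimumIF_spec : Claim_equal_findMinimumIF := by
  intro arr _ hpre
  unfold Spec_findMinimumIF findMinimumIF findMinimumIF_alt
  dsimp only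
  rw [PySem.List.foldl_append_singleton_eq_map, List.nil_append, loopA_eq, pvPairLoop_eq,
    pvOminA_eq_min?, pvOminA_eq_min?]
  congr 1
  set rev := arr.map pvRev with hrev
  set rs := PySem.List.sorted rev (fun x => x) false with hrs
  have hperm : rs.Perm rev := PySem.List.sorted_perm rev (fun x => x) false
  have hlen : 2 ≤ rs.length := by
    have h1 : rs.length = arr.length := by rw [hperm.length_eq, hrev, List.length_map]
    have h2 := hpre.1
    omega
  calc PySem.List.min? (pvAdjD rs) (fun x => x)
      = PySem.List.min? (pvPairD rs) (fun x => x) :=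
        min_adj_eq_min_pair (PySem.List.sorted_pairwise rev (fun x => x)) hlen
    _ = PySem.List.min? (pvPairD rev) (fun x => x) := min?_perm_int (pvPairD_perm hperm)
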